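-- pv_equiv track=rewrite | github.com/uvsq22103132/l1-python | 2048desecours.py | resultat
-- ===== SOURCE A (Python) =====
-- def resultat(grille):
--     for i in range(4):
--         for j in range(4):
--             if grille[i][j] == 2048:
--                 return 'bravo'
--     for i in range(4):
--         for j in range(4):
--             if grille[i][j] == 0:
--                 return 'ok'
--     for i in range(3):
--         for j in range(3):
--             if grille[i][j] == grille[i+1][j] or grille[i][j] == grille[i][j+1] :
--                 return 'ok'
--     for j in range(3):
--         if grille[3][j] == grille[3][j+1]:
--             return 'ok'
--     for i in range(3):
--         if grille[i][3] == grille[i+1][3]: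
--             return 'ok'
--     return 'perdu'
-- ===== SOURCE B (Python) =====
-- def resultat(grille):
--     has_zero = False
--     has_merge = False
--     for i in range(4):
--         for j in range(4):
--             v = grille[i][j]
--             if v == 2048:
--                 return 'bravo'
--             if v == 0:
--                 has_zero = True
--             if j < 3 and v == grille[i][j + 1]:
--                 has_merge = True
--             if i < 3 and v == grille[i + 1][j]:
--                 has_merge = True
--     return 'ok' if has_zero or has_merge else 'perdu'
-- ===== Notes on version B (the rewrite author's own statement) =====
-- stated objective: alternative
-- what changed: Replaces A's five sequential scans of the board (2048 pass, zero pass, and three adjacent-equal passes) by one row-major pass over the 16 cells that short-circuits on 2048 and accumulates has_zero/has_merge flags, deciding ok/perdu at the end.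
-- outside the precondition, e.g. on resultat([[0, 2048], [], [], []]): A returns 'bravo', B raises IndexError
import Mathlib
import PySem

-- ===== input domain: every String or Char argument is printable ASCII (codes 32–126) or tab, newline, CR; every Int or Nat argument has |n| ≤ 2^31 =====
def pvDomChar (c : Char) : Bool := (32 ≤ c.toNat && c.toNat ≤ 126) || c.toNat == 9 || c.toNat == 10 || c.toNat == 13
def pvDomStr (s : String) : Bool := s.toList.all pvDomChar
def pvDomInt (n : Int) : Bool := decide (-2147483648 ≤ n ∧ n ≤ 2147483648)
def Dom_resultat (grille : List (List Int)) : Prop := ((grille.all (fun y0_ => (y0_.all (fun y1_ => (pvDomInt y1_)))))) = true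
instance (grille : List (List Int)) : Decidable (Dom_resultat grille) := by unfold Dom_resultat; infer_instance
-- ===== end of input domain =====

-- B replaces A's five sequential board scans by one row-major accumulating pass (same outputs, same cost class).


-- ===== PORT A =====
-- grille[i][j]: exact on Pre_ (indices 0..3 in range); the default is never reached under Pre_.
def pvCell (g : List (List Int)) (i j : Int) : Int :=
  PySem.List.pyGetD (PySem.List.pyGetD g i []) j 0

def resultat (grille : List (List Int)) : String :=
  if (PySem.List.pyRange 0 4 1).any (fun i => (PySem.List.pyRange 0 4 1).any
      (fun j => pvCell grille i j == 2048)) then "bravo"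
  else if (PySem.List.pyRange 0 4 1).any (fun i => (PySem.List.pyRange 0 4 1).any
      (fun j => pvCell grille i j == 0)) then "ok"
  else if (PySem.List.pyRange 0 3 1).any (fun i => (PySem.List.pyRange 0 3 1).any
      (fun j => pvCell grille i j == pvCell grille (i+1) j || pvCell grille i j == pvCell grille i (j+1))) then "ok"
  else if (PySem.List.pyRange 0 3 1).any (fun j => pvCell grille 3 j == pvCell grille 3 (j+1)) then "ok"
  else if (PySem.List.pyRange 0 3 1).any (fun i => pvCell grille i 3 == pvCell grille (i+1) 3) then "ok"
  else "perdu"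

-- ===== PORT B =====
-- the 16 cell coordinates in row-major order
def pvCells : List (Int × Int) :=
  (PySem.List.pyRange 0 4 1).flatMap (fun i => (PySem.List.pyRange 0 4 1).map (fun j => (i, j)))

def pvLoop (g : List (List Int)) : List (Int × Int) → Bool → Bool → String
  | [], hz, hm => if hz || hm then "ok" else "perdu"
  | (i, j) :: rest, hz, hm =>
    let v := pvCell g i j
    if v == 2048 then "bravo"
    else pvLoop g rest (hz || v == 0)
      ((hm || (decide (j < 3) && (v == pvCell g i (j+1)))) || (decide (i < 3) && (v == pvCell g (i+1) j)))

def resultat_alt (grille : List (List Int)) : String :=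
  pvLoop grille pvCells false false

-- ===== PRECONDITION & SPEC =====
-- Pre_ excludes grids that are not at least 4×4: there Python A raises IndexError, except when a 2048
-- occurs before the first out-of-range access in A's row-major scan — an artefact of A's scan order.
def Pre_resultat (grille : List (List Int)) : Prop :=
  4 ≤ grille.length ∧ ∀ row ∈ grille.take 4, 4 ≤ row.length
instance (grille : List (List Int)) : Decidable (Pre_resultat grille) := by
  unfold Pre_resultat; infer_instance

def pvWitness_resultat : List (List Int) :=
  [[2, 4, 8, 16], [32, 64, 128, 256], [2, 4, 8, 16], [32, 64, 128, 256]]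

def Spec_resultat (grille : List (List Int)) (out : String) : Prop := out = resultat_alt grille
instance (grille : List (List Int)) (out : String) : Decidable (Spec_resultat grille out) := by
  unfold Spec_resultat; infer_instance

-- ===== CLAIM (what is proved, stated in full; the proofs are below) =====
def Claim_equal_resultat : Prop :=
  ∀ (grille : List (List Int)), Dom_resultat grille → Pre_resultat grille →
    Spec_resultat grille (resultat grille)

-- ===== LEMMAS AND PROOFS =====

-- collapse an early-return chain: two ifs with the same 'then' are one if on the disjunction
theorem pv_ite_or (a b : Bool) (x y : String) :
    (if a then x else if b then x else y) = (if (a || b) then x else y) := by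
  cases a <;> simp

-- characterisation of B's single pass
theorem pvLoop_eq (g : List (List Int)) (cells : List (Int × Int)) (hz hm : Bool) :
    pvLoop g cells hz hm =
      if cells.any (fun p => pvCell g p.1 p.2 == 2048) then "bravo"
      else if hz || hm || cells.any (fun p => pvCell g p.1 p.2 == 0 ||
          ((decide (p.2 < 3) && (pvCell g p.1 p.2 == pvCell g p.1 (p.2+1))) ||
           (decide (p.1 < 3) && (pvCell g p.1 p.2 == pvCell g (p.1+1) p.2)))) then "ok"
      else "perdu" := by
  induction cells generalizing hz hm with
  | nil => simp [pvLoop]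
  | cons p rest ih =>
    obtain ⟨i, j⟩ := p
    by_cases h : pvCell g i j == 2048
    · simp [pvLoop, h]
    · simp only [pvLoop, h, if_neg, Bool.false_eq_true, not_false_eq_true, List.any_cons, ih,
        Bool.false_or, Bool.or_eq_true]
      congr 1
      cases hz <;> cases hm <;>
        first
          | rfl
          | simp [Bool.or_comm]
          | ac_rfl

-- ===== VERDICT (by name: the statement is the Claim_ definition above) =====
theorem pv_if_congr (a a' b b' : Bool) (x y z : String) (h1 : a = a') (h2 : b = b') :
    (if a then x else if b then y else z) = (if a' then x else if b' then y else z) := by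
  rw [h1, h2]

set_option maxHeartbeats 1000000 in
theorem resultat_spec : Claim_equal_resultat := by
  intro g _ _
  show resultat g = resultat_alt g
  have h4 : PySem.List.pyRange 0 4 1 = [0, 1, 2, 3] := by decide
  have h3 : PySem.List.pyRange 0 3 1 = [0, 1, 2] := by decide
  rw [resultat_alt, pvLoop_eq]
  simp only [resultat, pvCells, h4, h3, List.flatMap_cons, List.flatMap_nil, List.map_cons,
    List.map_nil, List.any_cons, List.any_nil, List.cons_append, List.nil_append, List.append_nil,
    show (decide ((0:Int) < 3)) = true from rfl, show (decide ((1:Int) < 3)) = true from rfl,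
    show (decide ((2:Int) < 3)) = true from rfl, show (decide ((3:Int) < 3)) = false from rfl,
    Bool.true_and, Bool.false_and, Bool.or_false, Bool.false_or, pv_ite_or]
  apply pv_if_congr <;> ac_rfl
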